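-- pv_equiv track=rewrite | github.com/syurskyi/Algorithms_and_Data_Structure | _algorithms_challenges/leetcode/LeetcodePythonProject/leetcode_0751_0800/LeetCode751_IPToCIDR.py | long2ip
-- ===== SOURCE A (Python) =====
-- def long2ip(x, step):
--     res = [0]*4
--     for i in range(3, -1, -1):
--         res[i] = x&255
--         x >>= 8
--     n = 33
--     while step > 0:
--         n -= 1
--         step //= 2
--     return '.'.join([str(s) for s in res])+'/'+str(n)
-- ===== SOURCE B (Python) =====
-- def long2ip(x, step):
--     octets = '.'.join(str((x >> s) & 255) for s in (24, 16, 8, 0))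
--     n = 33 - step.bit_length() if step > 0 else 33
--     return octets + '/' + str(n)
-- ===== Notes on version B (the rewrite author's own statement) =====
-- stated objective: idiomatic
-- what changed: The destructive four-byte loop over a preallocated list becomes a comprehension over independent shifts (24,16,8,0), and the halving while-loop computing the prefix length is replaced by the closed form 33 - step.bit_length() (33 when step <= 0).
import Mathlib
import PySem

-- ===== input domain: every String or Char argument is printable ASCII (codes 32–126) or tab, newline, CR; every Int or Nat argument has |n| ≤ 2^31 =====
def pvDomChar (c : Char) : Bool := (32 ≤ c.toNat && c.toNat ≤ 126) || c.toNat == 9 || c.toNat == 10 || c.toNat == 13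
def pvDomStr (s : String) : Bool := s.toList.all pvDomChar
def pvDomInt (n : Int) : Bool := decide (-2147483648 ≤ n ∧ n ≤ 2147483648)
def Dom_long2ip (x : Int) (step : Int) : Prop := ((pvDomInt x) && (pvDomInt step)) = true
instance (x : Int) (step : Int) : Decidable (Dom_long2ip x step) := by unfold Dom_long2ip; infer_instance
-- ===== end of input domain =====

-- B replaces A's destructive byte loop by a map over independent shifts and A's halving while-loop by the closed form 33 - bit_length(step); idiomatic, same cost.


-- ===== PORT A =====
-- A's 'while step > 0: n -= 1; step //= 2' loop
def long2ipWhile (n : Int) (step : Int) : Int :=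
  if 0 < step then long2ipWhile (n - 1) (PySem.Int.floordiv step 2) else n
termination_by step.toNat
decreasing_by
  rw [PySem.Int.floordiv_eq_ediv_of_pos (by norm_num)]
  omega

def long2ip (x : Int) (step : Int) : String :=
  let res : List Int := [0, 0, 0, 0]
  -- 'res[i] = x & 255' with i running over range(3,-1,-1): i is always a nonnegative in-range index, so List.set i.toNat is exact
  let st := (PySem.List.pyRange 3 (-1) (-1)).foldl
    (fun (st : List Int × Int) i =>
      (st.1.set i.toNat (PySem.Int.band st.2 255), st.2 >>> (8 : Nat))) (res, x)
  let n := long2ipWhile 33 step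
  PySem.Str.join "." (st.1.map PySem.Int.toStr) ++ "/" ++ PySem.Int.toStr n

-- ===== PORT B =====
def long2ip_alt (x : Int) (step : Int) : String :=
  let octets := PySem.Str.join "." ([24, 16, 8, 0].map
    (fun (s : Nat) => PySem.Int.toStr (PySem.Int.band (x >>> s) 255)))
  let n : Int := if 0 < step then 33 - (PySem.Int.bitLength step : Int) else 33
  octets ++ "/" ++ PySem.Int.toStr n

-- ===== PRECONDITION & SPEC =====
def Spec_long2ip (x : Int) (step : Int) (out : String) : Prop := out = long2ip_alt x step
instance (x : Int) (step : Int) (out : String) : Decidable (Spec_long2ip x step out) := by unfold Spec_long2ip; infer_instance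

-- ===== CLAIM (what is proved, stated in full; the proofs are below) =====
def Claim_equal_long2ip : Prop := ∀ (x : Int) (step : Int), Dom_long2ip x step → Spec_long2ip x step (long2ip x step)

-- ===== LEMMAS AND PROOFS =====

-- composing Python's arithmetic right shifts: shifting by m then by 8 is shifting by m + 8
theorem shr_shr8 (x : Int) (m : Nat) : (x >>> m) >>> (8 : Nat) = x >>> (m + 8) := by
  simp [Int.shiftRight_eq_div_pow, pow_add]
  rw [Int.ediv_ediv_of_nonneg (by positivity)]

-- A's while-loop computes n - bit_length(step) for positive step
theorem long2ipWhile_eq (k : Nat) (n step : Int) (hpos : 0 < step) (hk : step.toNat ≤ k) :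
    long2ipWhile n step = n - (PySem.Int.bitLength step : Int) := by
  induction k generalizing n step with
  | zero => omega
  | succ k ih =>
    rw [long2ipWhile, if_pos hpos]
    have hfd : PySem.Int.floordiv step 2 = step / 2 :=
      PySem.Int.floordiv_eq_ediv_of_pos (by norm_num)
    by_cases h2 : 0 < PySem.Int.floordiv step 2
    · rw [ih (n - 1) _ h2 (by rw [hfd] at h2 ⊢; omega),
        PySem.Int.bitLength_of_pos hpos]
      push_cast
      ring
    · have hstep1 : step = 1 := by rw [hfd] at h2; omega
      subst hstep1
      rw [long2ipWhile, if_neg h2]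
      have hbl : PySem.Int.bitLength (1 : Int) = 1 := by decide
      rw [hbl]
      ring

theorem long2ip_eq_alt (x step : Int) : long2ip x step = long2ip_alt x step := by
  simp only [long2ip, long2ip_alt,
    show (PySem.List.pyRange 3 (-1) (-1)) = [3, 2, 1, 0] from by decide,
    List.foldl]
  rw [shr_shr8 x 8, shr_shr8 x 16]
  norm_num
  rw [show ((3 : Int).toNat) = 3 from rfl, show ((2 : Int).toNat) = 2 from rfl]
  simp only [List.set]
  have hn : long2ipWhile 33 step
      = if 0 < step then 33 - (PySem.Int.bitLength step : Int) else 33 := by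
    by_cases hpos : 0 < step
    · rw [if_pos hpos, long2ipWhile_eq step.toNat 33 step hpos le_rfl]
    · rw [if_neg hpos, long2ipWhile, if_neg hpos]
  rw [hn]

-- ===== VERDICT (by name: the statement is the Claim_ definition above) =====
theorem long2ip_spec : Claim_equal_long2ip := by
  intro x step _
  unfold Spec_long2ip
  exact long2ip_eq_alt x step
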